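-- pv_equiv track=rewrite | github.com/serrasqueiro/tinyconf | packages/expected/dirlist.py | slim_path
-- ===== SOURCE A (Python) =====
-- def slim_path(name) -> str:
--     """ Reduce name to its essential, avoid duplications of relative paths.
--     """
--     assert isinstance(name, str)
--     last = name
--     safe = 10 ** 3
--     while safe > 0:
--         safe -= 1
--         if name.startswith(("./", ".\\")):
--             name = name[2:]
--         if name == last:
--             break
--         last = name
--     while len(name) > 1 and name.endswith(("/", "\\")):
--         name = name[:-1]
--     return name
-- ===== SOURCE B (Python) =====
-- def slim_path(name) -> str:
--     """ Reduce name to its essential, avoid duplications of relative paths. """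
--     assert isinstance(name, str)
--     # count leading "./" / ".\" prefixes by advancing an index (capped at 1000)
--     i = 0
--     k = 0
--     while k < 1000 and name[i:i+2] in ("./", ".\\"):
--         i += 2
--         k += 1
--     s = name[i:]
--     # number of chars to keep: drop trailing slashes but keep at least one char
--     j = len(s)
--     while j > 1 and s[j-1] in ("/", "\\"):
--         j -= 1
--     return s[:j]
-- ===== Notes on version B (the rewrite author's own statement) =====
-- stated objective: alternative
-- what changed: Replaces A's repeated destructive string re-slicing loops by an index computation (advance i by 2 per './'/'.\' prefix, capped at 1000; decrement j over trailing slashes keeping one char) followed by two single slices.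
import Mathlib
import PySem

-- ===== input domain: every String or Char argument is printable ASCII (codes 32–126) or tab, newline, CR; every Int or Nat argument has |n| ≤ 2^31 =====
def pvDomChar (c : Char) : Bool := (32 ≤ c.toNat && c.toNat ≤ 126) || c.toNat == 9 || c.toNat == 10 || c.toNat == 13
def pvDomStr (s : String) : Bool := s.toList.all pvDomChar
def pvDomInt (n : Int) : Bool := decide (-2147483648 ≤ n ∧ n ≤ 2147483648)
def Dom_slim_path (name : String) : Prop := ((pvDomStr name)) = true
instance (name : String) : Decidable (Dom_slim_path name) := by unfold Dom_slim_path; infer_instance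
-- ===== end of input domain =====

-- B strips the same prefixes/suffixes but computes cut indices first and slices once each side (alternative decomposition).

-- ===== PORT A =====
-- name.startswith(("./", ".\\"))
def aStartsDot (l : List Char) : Bool := ['.', '/'].isPrefixOf l || ['.', '\\'].isPrefixOf l

-- the 'while safe > 0' loop of A (state: name, last; safe is the fuel)
def aLoop : Nat → List Char → List Char → List Char
  | 0, name, _last => name
  | safe + 1, name, last =>
    let name' := if aStartsDot name then name.drop 2 else name
    if name' = last then name' else aLoop safe name' name'

-- the 'while len(name) > 1 and name.endswith(("/", "\\"))' loop of A
def aTrail (name : List Char) : List Char :=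
  if h : 1 < name.length ∧ (name.getLast? = some '/' ∨ name.getLast? = some '\\')
  then aTrail name.dropLast else name
termination_by name.length
decreasing_by
  have := h.1
  simp only [List.length_dropLast]
  omega

def slim_path (name : String) : String :=
  String.mk (aTrail (aLoop 1000 name.toList name.toList))

-- ===== PORT B =====
-- B's first while loop: advance i by 2 while name[i:i+2] is "./" or ".\" and k < 1000
def bScan (name : List Char) (i k : Nat) : Nat :=
  if h : k < 1000 ∧ ((name.drop i).take 2 = ['.', '/'] ∨ (name.drop i).take 2 = ['.', '\\'])
  then bScan name (i + 2) (k + 1) else i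
termination_by 1000 - k
decreasing_by
  have := h.1
  omega

-- B's second while loop: decrement j while j > 1 and s[j-1] is a slash
def bKeep (s : List Char) (j : Nat) : Nat :=
  if h : 1 < j ∧ (s[j-1]? = some '/' ∨ s[j-1]? = some '\\')
  then bKeep s (j - 1) else j
termination_by j
decreasing_by
  have := h.1
  omega

def slim_path_alt (name : String) : String :=
  let i := bScan name.toList 0 0
  let s := name.toList.drop i
  String.mk (s.take (bKeep s s.length))

-- ===== PRECONDITION & SPEC =====
def Spec_slim_path (name : String) (out : String) : Prop := out = slim_path_alt name
instance (name : String) (out : String) : Decidable (Spec_slim_path name out) := by unfold Spec_slim_path; infer_instance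

-- ===== CLAIM (what is proved, stated in full; the proofs are below) =====
def Claim_equal_slim_path : Prop := ∀ (name : String), Dom_slim_path name → Spec_slim_path name (slim_path name)

-- ===== LEMMAS AND PROOFS =====

lemma aStartsDot_iff (t : List Char) :
    aStartsDot t = true ↔ (t.take 2 = ['.', '/'] ∨ t.take 2 = ['.', '\\']) := by
  simp only [aStartsDot, Bool.or_eq_true, List.isPrefixOf_iff_prefix,
    List.prefix_iff_eq_take]
  constructor
  · rintro (h | h)
    · exact Or.inl h.symm
    · exact Or.inr h.symm
  · rintro (h | h)
    · exact Or.inl h.symm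
    · exact Or.inr h.symm

lemma aStartsDot_two_le (l : List Char) (h : aStartsDot l = true) : 2 ≤ l.length := by
  simp only [aStartsDot, Bool.or_eq_true, List.isPrefixOf_iff_prefix] at h
  rcases h with h | h <;> simpa using h.length_le

-- total number of leading "./" / ".\" prefixes
def cnt (l : List Char) : Nat :=
  if h : aStartsDot l then cnt (l.drop 2) + 1 else 0
termination_by l.length
decreasing_by
  have := aStartsDot_two_le l h
  simp only [List.length_drop]
  omega

lemma aLoop_eq (safe : Nat) : ∀ l : List Char, aLoop safe l l = l.drop (2 * min (cnt l) safe) := by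
  induction safe with
  | zero => intro l; simp [aLoop]
  | succ n ih =>
    intro l
    rw [aLoop]
    by_cases h : aStartsDot l = true
    · have h2 := aStartsDot_two_le l h
      have hne : l.drop 2 ≠ l := by
        intro he
        have := congrArg List.length he
        simp only [List.length_drop] at this
        omega
      simp only [h, if_true, if_neg hne]
      have hc : cnt l = cnt (l.drop 2) + 1 := by rw [cnt, dif_pos h]
      rw [ih (l.drop 2), List.drop_drop, hc]
      congr 1
      omega
    · have hc : cnt l = 0 := by rw [cnt, dif_neg (by simp [h])]
      simp [h, hc]

lemma bScan_eq_aux (m : Nat) : ∀ (k i : Nat) (l : List Char), 1000 - k ≤ m →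
    bScan l i k = i + 2 * min (cnt (l.drop i)) (1000 - k) := by
  induction m with
  | zero =>
    intro k i l hm
    rw [bScan, dif_neg (by omega)]
    have : 1000 - k = 0 := by omega
    simp [this]
  | succ n ih =>
    intro k i l hm
    rw [bScan]
    by_cases hp : (l.drop i).take 2 = ['.', '/'] ∨ (l.drop i).take 2 = ['.', '\\']
    · by_cases hk : k < 1000
      · rw [dif_pos ⟨hk, hp⟩, ih (k + 1) (i + 2) l (by omega)]
        have hs : aStartsDot (l.drop i) = true := (aStartsDot_iff _).mpr hp
        have hc : cnt (l.drop i) = cnt ((l.drop i).drop 2) + 1 := by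
          rw [cnt, dif_pos hs]
        rw [List.drop_drop] at hc
        rw [hc]
        omega
      · rw [dif_neg (by omega)]
        have : 1000 - k = 0 := by omega
        simp [this]
    · rw [dif_neg (by tauto)]
      have : cnt (l.drop i) = 0 := by
        rw [cnt, dif_neg (by simp [aStartsDot_iff, hp])]
      simp [this]

lemma bKeep_le (s : List Char) : ∀ j, bKeep s j ≤ j := by
  intro j
  induction j using Nat.strong_induction_on with
  | _ j ih =>
    rw [bKeep]
    split
    · next h => exact le_trans (ih (j - 1) (by omega)) (by omega)
    · exact le_refl j

lemma bKeep_prefix (t r : List Char) : ∀ j, j ≤ t.length → bKeep (t ++ r) j = bKeep t j := by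
  intro j
  induction j using Nat.strong_induction_on with
  | _ j ih =>
    intro hj
    conv_lhs => rw [bKeep]
    conv_rhs => rw [bKeep]
    by_cases h1 : 1 < j
    · have hidx : (t ++ r)[j - 1]? = t[j - 1]? := List.getElem?_append_left (by omega)
      rw [hidx]
      by_cases hcond : 1 < j ∧ (t[j - 1]? = some '/' ∨ t[j - 1]? = some '\\')
      · rw [dif_pos hcond, dif_pos hcond]
        exact ih (j - 1) (by omega) (by omega)
      · rw [dif_neg hcond, dif_neg hcond]
    · rw [dif_neg (fun hc => h1 hc.1), dif_neg (fun hc => h1 hc.1)]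

lemma aTrail_eq_aux (n : Nat) : ∀ s : List Char, s.length ≤ n →
    aTrail s = s.take (bKeep s s.length) := by
  induction n with
  | zero =>
    intro s hs
    have : s = [] := List.length_eq_zero_iff.mp (by omega)
    subst this
    rw [aTrail, bKeep]
    simp
  | succ n ih =>
    intro s hs
    rw [aTrail]
    have hlast : s.getLast? = s[s.length - 1]? := List.getLast?_eq_getElem?
    by_cases hc : 1 < s.length ∧ (s[s.length - 1]? = some '/' ∨ s[s.length - 1]? = some '\\')
    · rw [dif_pos (by rw [hlast]; exact hc)]
      have hne : s ≠ [] := by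
        intro h
        subst h
        simp at hc
      have hdl : s.dropLast.length = s.length - 1 := List.length_dropLast
      have hpre : s.dropLast ++ [s.getLast hne] = s := List.dropLast_append_getLast hne
      rw [ih s.dropLast (by omega), hdl]
      have hbk : bKeep s (s.length - 1) = bKeep s.dropLast (s.length - 1) := by
        have h2 := bKeep_prefix s.dropLast [s.getLast hne] (s.length - 1) (by simp [hdl])
        rw [hpre] at h2
        exact h2
      have hbk2 : bKeep s s.length = bKeep s (s.length - 1) := by
        conv_lhs => rw [bKeep]
        rw [dif_pos hc]
      rw [← hbk, hbk2]
      have hle : bKeep s (s.length - 1) ≤ s.length - 1 := bKeep_le s _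
      rw [List.dropLast_eq_take, List.take_take]
      congr 1
      omega
    · rw [dif_neg (by rw [hlast]; exact hc)]
      rw [bKeep, dif_neg hc]
      simp

-- ===== VERDICT (by name: the statement is the Claim_ definition above) =====
theorem slim_path_spec : Claim_equal_slim_path := by
  intro name _
  unfold Spec_slim_path slim_path slim_path_alt
  have hb : bScan name.toList 0 0 = 2 * min (cnt name.toList) 1000 := by
    have h := bScan_eq_aux 1000 0 0 name.toList (by omega)
    simpa using h
  rw [aLoop_eq 1000 name.toList, aTrail_eq_aux (name.toList.drop (2 * min (cnt name.toList) 1000)).length _ le_rfl]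
  simp only [hb]
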